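-- pv_equiv track=rewrite | github.com/TP25-Phage-Infection-Classifiers/vivid-virions | src/pipeline_steps/classification.py | classify_timepoint
-- ===== SOURCE A (Python) =====
-- def classify_timepoint(col, filename):
--     if "Lood" in filename:
--         if col.startswith("5_"): return "early"
--         elif col.startswith("15_"): return "middle"
--         elif col.startswith("25_"): return "late"
--     elif "Yang" in filename:
--         if col.startswith("5_"): return "early"
--         elif col.startswith("10_"): return "middle"
--         elif col.startswith("20_"): return "late"
--     elif "Finstrlova" in filename:
--         if any(col.startswith(tp) for tp in ["2_", "5_", "10_"]): return "early"
--         elif col.startswith("20_"): return "middle"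
--         elif col.startswith("30_"): return "late"
--     elif "Brandao" in filename:
--         if col.startswith("5_"): return "early"
--         elif col.startswith("10_"): return "middle"
--         elif col.startswith("15_"): return "late"
--     elif "Guegler_T4" in filename:
--         if col.startswith("2.5_"): return "early"
--         elif col.startswith("5_"): return "middle"
--         elif any(col.startswith(tp) for tp in ["10_", "20_", "30_"]): return "late"
--     elif "Guegler_T7" in filename:
--         if any(col.startswith(tp) for tp in ["2.5_", "5_", "10_"]): return "early"
--         elif col.startswith("20_"): return "middle"
--         elif col.startswith("30_"): return "late"
--     elif "Sprenger" in filename: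
--         if col.startswith("0_"): return "early"
--         elif col.startswith("30_"): return "middle"
--         elif col.startswith("60_"): return "late"
--     return None
-- ===== SOURCE B (Python) =====
-- # B: tokenize col at the first "_" and classify the extracted timepoint by its
-- # rank in the dataset's ordered timepoint list, instead of chained prefix tests.
-- DATASETS = [
--     ("Lood",       ["5", "15", "25"],            1, 1),
--     ("Yang",       ["5", "10", "20"],            1, 1),
--     ("Finstrlova", ["2", "5", "10", "20", "30"], 3, 1),
--     ("Brandao",    ["5", "10", "15"],            1, 1),
--     ("Guegler_T4", ["2.5", "5", "10", "20", "30"], 1, 1),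
--     ("Guegler_T7", ["2.5", "5", "10", "20", "30"], 3, 1),
--     ("Sprenger",   ["0", "30", "60"],            1, 1),
-- ]
--
--
-- def classify_timepoint(col, filename):
--     head, sep, _tail = col.partition("_")
--     if not sep:
--         return None
--     for key, timepoints, n_early, n_middle in DATASETS:
--         if key in filename:
--             if head not in timepoints:
--                 return None
--             rank = timepoints.index(head)
--             if rank < n_early:
--                 return "early"
--             if rank < n_early + n_middle:
--                 return "middle"
--             return "late"
--     return None
-- ===== Notes on version B (the rewrite author's own statement) =====
-- stated objective: alternative
-- what changed: Instead of chained startswith prefix tests, B tokenizes col once at the first '_' (str.partition), looks the token up in the matching dataset's ordered timepoint list, and derives the label arithmetically from the token's rank against per-dataset early/middle counts.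
import Mathlib
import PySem

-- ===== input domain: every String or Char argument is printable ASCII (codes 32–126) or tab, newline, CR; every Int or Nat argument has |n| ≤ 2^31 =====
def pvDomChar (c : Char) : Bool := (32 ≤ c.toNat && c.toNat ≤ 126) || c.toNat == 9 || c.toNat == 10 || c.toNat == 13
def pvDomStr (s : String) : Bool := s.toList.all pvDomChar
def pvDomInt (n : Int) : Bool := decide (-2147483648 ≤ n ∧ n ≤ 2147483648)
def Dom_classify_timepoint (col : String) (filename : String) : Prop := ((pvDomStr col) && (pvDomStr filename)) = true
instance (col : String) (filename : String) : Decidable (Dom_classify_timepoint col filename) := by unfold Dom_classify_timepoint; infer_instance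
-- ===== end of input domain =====

-- B tokenizes col at the first "_" and classifies the token by its rank in the dataset's ordered timepoint list (alternative decomposition, same cost).


-- ===== PORT A =====
def classify_timepoint (col : String) (filename : String) : Option String :=
  if PySem.Str.isIn "Lood" filename then
    (if PySem.Str.startswith col "5_" then some "early"
     else if PySem.Str.startswith col "15_" then some "middle"
     else if PySem.Str.startswith col "25_" then some "late" else none)
  else if PySem.Str.isIn "Yang" filename then
    (if PySem.Str.startswith col "5_" then some "early"
     else if PySem.Str.startswith col "10_" then some "middle"
     else if PySem.Str.startswith col "20_" then some "late" else none)
  else if PySem.Str.isIn "Finstrlova" filename then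
    (if ["2_", "5_", "10_"].any (fun tp => PySem.Str.startswith col tp) then some "early"
     else if PySem.Str.startswith col "20_" then some "middle"
     else if PySem.Str.startswith col "30_" then some "late" else none)
  else if PySem.Str.isIn "Brandao" filename then
    (if PySem.Str.startswith col "5_" then some "early"
     else if PySem.Str.startswith col "10_" then some "middle"
     else if PySem.Str.startswith col "15_" then some "late" else none)
  else if PySem.Str.isIn "Guegler_T4" filename then
    (if PySem.Str.startswith col "2.5_" then some "early"
     else if PySem.Str.startswith col "5_" then some "middle"
     else if ["10_", "20_", "30_"].any (fun tp => PySem.Str.startswith col tp) then some "late" else none)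
  else if PySem.Str.isIn "Guegler_T7" filename then
    (if ["2.5_", "5_", "10_"].any (fun tp => PySem.Str.startswith col tp) then some "early"
     else if PySem.Str.startswith col "20_" then some "middle"
     else if PySem.Str.startswith col "30_" then some "late" else none)
  else if PySem.Str.isIn "Sprenger" filename then
    (if PySem.Str.startswith col "0_" then some "early"
     else if PySem.Str.startswith col "30_" then some "middle"
     else if PySem.Str.startswith col "60_" then some "late" else none)
  else none

-- ===== PORT B =====
-- (key, ordered timepoint tokens, how many of them are "early", how many are "middle")
def pvDatasets : List (String × List String × Nat × Nat) :=
  [("Lood",       (["5", "15", "25"],            1, 1)),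
   ("Yang",       (["5", "10", "20"],            1, 1)),
   ("Finstrlova", (["2", "5", "10", "20", "30"], 3, 1)),
   ("Brandao",    (["5", "10", "15"],            1, 1)),
   ("Guegler_T4", (["2.5", "5", "10", "20", "30"], 1, 1)),
   ("Guegler_T7", (["2.5", "5", "10", "20", "30"], 3, 1)),
   ("Sprenger",   (["0", "30", "60"],            1, 1))]

-- "rank = timepoints.index(head)" + the three rank comparisons of Source B's loop body
def pvRankLabel (rank? : Option Nat) (nEarly nMiddle : Nat) : Option String :=
  match rank? with
  | some rank =>
      if rank < nEarly then some "early"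
      else if rank < nEarly + nMiddle then some "middle"
      else some "late"
  | none => none

-- the for-loop of B: first dataset whose key occurs in filename, then rank-based label
def pvScanDatasets (head : String) (filename : String) :
    List (String × List String × Nat × Nat) → Option String
  | [] => none
  | (key, tps, nEarly, nMiddle) :: rest =>
      if PySem.Str.isIn key filename then
        if tps.contains head = false then none      -- "if head not in timepoints: return None"
        else pvRankLabel (PySem.List.index? tps head) nEarly nMiddle
      else pvScanDatasets head filename rest

def classify_timepoint_alt (col : String) (filename : String) : Option String :=
  -- head, sep, _tail = col.partition("_"): head = chars before the first '_', sep nonempty iff '_' occurs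
  let head := String.ofList (col.toList.takeWhile (fun c => c ≠ '_'))
  let sep := col.toList.contains '_'
  if sep = false then none
  else pvScanDatasets head filename pvDatasets

-- ===== PRECONDITION & SPEC =====
def Spec_classify_timepoint (col : String) (filename : String) (out : Option String) : Prop := out = classify_timepoint_alt col filename
instance (col : String) (filename : String) (out : Option String) : Decidable (Spec_classify_timepoint col filename out) := by unfold Spec_classify_timepoint; infer_instance

-- ===== CLAIM (what is proved, stated in full; the proofs are below) =====
def Claim_equal_classify_timepoint : Prop := ∀ (col : String) (filename : String), Dom_classify_timepoint col filename → Spec_classify_timepoint col filename (classify_timepoint col filename)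

-- ===== LEMMAS AND PROOFS =====

-- a "token_" prefix test is exactly: the chars before the first '_' equal the token, and '_' occurs
theorem pv_prefix_underscore (p l : List Char) (hp : '_' ∉ p) :
    ((p ++ ['_']) <+: l) ↔ (l.takeWhile (fun c => c ≠ '_') = p ∧ '_' ∈ l) := by
  induction p generalizing l with
  | nil =>
    cases l with
    | nil => simp
    | cons c l' =>
      by_cases hc : c = '_' <;>
        simp [hc, List.cons_prefix_cons, Ne.symm]
  | cons a p' ih =>
    have ha : a ≠ '_' := fun h => hp (h ▸ List.mem_cons_self)
    have hp' : '_' ∉ p' := fun h => hp (List.mem_cons_of_mem _ h)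
    cases l with
    | nil => simp
    | cons c l' =>
      by_cases hc : c = a
      · subst hc
        simp [List.cons_prefix_cons, List.takeWhile_cons, ha, ih l' hp', Ne.symm ha]
      · simp [List.cons_prefix_cons, List.takeWhile_cons, hc, Ne.symm hc]
        intro h
        by_cases h_ : c = '_' <;> simp_all

theorem pv_startswith_token (col : String) (p : List Char) (hp : '_' ∉ p) :
    PySem.Str.startswith col (String.ofList (p ++ ['_'])) =
      ((col.toList.takeWhile (fun c => c ≠ '_') == p) && col.toList.contains '_') := by
  rw [PySem.Str.startswith_eq, Bool.eq_iff_iff]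
  simp [PySem.Chars.startswith_iff, pv_prefix_underscore _ _ hp]

theorem pv_ofList_eq_iff (a : List Char) (s : String) :
    (String.ofList a = s) ↔ a = s.toList :=
  ⟨fun h => by have := congrArg String.toList h; simpa using this,
   fun h => by rw [h]; exact String.ofList_toList⟩


theorem inner_Lood (tw : List Char) :
    (if (tw == ['5']) = true then some "early"
     else if (tw == ['1', '5']) = true then some "middle"
     else if (tw == ['2', '5']) = true then some "late"
     else (none : Option String))
    = (if (["5", "15", "25"] : List String).contains (String.ofList tw) = false then none
       else pvRankLabel (PySem.List.index? (["5", "15", "25"] : List String) (String.ofList tw)) 1 1) := by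
  by_cases e0 : tw = ['5']
  · subst e0; decide
  by_cases e1 : tw = ['1', '5']
  · subst e1; decide
  by_cases e2 : tw = ['2', '5']
  · subst e2; decide
  have hc : (["5", "15", "25"] : List String).contains (String.ofList tw) = false := by
    simp only [List.contains_eq_mem, pv_ofList_eq_iff, decide_eq_false_iff_not, List.mem_cons, List.not_mem_nil, not_or]
    simp_all [pv_ofList_eq_iff]
  simp [hc, e0, e1, e2, pv_ofList_eq_iff, pvRankLabel] <;> simp_all [pv_ofList_eq_iff]

theorem inner_Yang (tw : List Char) :
    (if (tw == ['5']) = true then some "early"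
     else if (tw == ['1', '0']) = true then some "middle"
     else if (tw == ['2', '0']) = true then some "late"
     else (none : Option String))
    = (if (["5", "10", "20"] : List String).contains (String.ofList tw) = false then none
       else pvRankLabel (PySem.List.index? (["5", "10", "20"] : List String) (String.ofList tw)) 1 1) := by
  by_cases e0 : tw = ['5']
  · subst e0; decide
  by_cases e1 : tw = ['1', '0']
  · subst e1; decide
  by_cases e2 : tw = ['2', '0']
  · subst e2; decide
  have hc : (["5", "10", "20"] : List String).contains (String.ofList tw) = false := by
    simp only [List.contains_eq_mem, pv_ofList_eq_iff, decide_eq_false_iff_not, List.mem_cons, List.not_mem_nil, not_or]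
    simp_all [pv_ofList_eq_iff]
  simp [hc, e0, e1, e2, pv_ofList_eq_iff, pvRankLabel] <;> simp_all [pv_ofList_eq_iff]

theorem inner_Finstrlova (tw : List Char) :
    (if (tw == ['2'] || (tw == ['5'] || tw == ['1', '0'])) = true then some "early"
     else if (tw == ['2', '0']) = true then some "middle"
     else if (tw == ['3', '0']) = true then some "late"
     else (none : Option String))
    = (if (["2", "5", "10", "20", "30"] : List String).contains (String.ofList tw) = false then none
       else pvRankLabel (PySem.List.index? (["2", "5", "10", "20", "30"] : List String) (String.ofList tw)) 3 1) := by
  by_cases e0 : tw = ['2']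
  · subst e0; decide
  by_cases e1 : tw = ['5']
  · subst e1; decide
  by_cases e2 : tw = ['1', '0']
  · subst e2; decide
  by_cases e3 : tw = ['2', '0']
  · subst e3; decide
  by_cases e4 : tw = ['3', '0']
  · subst e4; decide
  have hc : (["2", "5", "10", "20", "30"] : List String).contains (String.ofList tw) = false := by
    simp only [List.contains_eq_mem, pv_ofList_eq_iff, decide_eq_false_iff_not, List.mem_cons, List.not_mem_nil, not_or]
    simp_all [pv_ofList_eq_iff]
  simp [hc, e0, e1, e2, e3, e4, pv_ofList_eq_iff, pvRankLabel] <;> simp_all [pv_ofList_eq_iff]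

theorem inner_Brandao (tw : List Char) :
    (if (tw == ['5']) = true then some "early"
     else if (tw == ['1', '0']) = true then some "middle"
     else if (tw == ['1', '5']) = true then some "late"
     else (none : Option String))
    = (if (["5", "10", "15"] : List String).contains (String.ofList tw) = false then none
       else pvRankLabel (PySem.List.index? (["5", "10", "15"] : List String) (String.ofList tw)) 1 1) := by
  by_cases e0 : tw = ['5']
  · subst e0; decide
  by_cases e1 : tw = ['1', '0']
  · subst e1; decide
  by_cases e2 : tw = ['1', '5']
  · subst e2; decide
  have hc : (["5", "10", "15"] : List String).contains (String.ofList tw) = false := by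
    simp only [List.contains_eq_mem, pv_ofList_eq_iff, decide_eq_false_iff_not, List.mem_cons, List.not_mem_nil, not_or]
    simp_all [pv_ofList_eq_iff]
  simp [hc, e0, e1, e2, pv_ofList_eq_iff, pvRankLabel] <;> simp_all [pv_ofList_eq_iff]

theorem inner_Guegler_T4 (tw : List Char) :
    (if (tw == ['2', '.', '5']) = true then some "early"
     else if (tw == ['5']) = true then some "middle"
     else if (tw == ['1', '0'] || (tw == ['2', '0'] || tw == ['3', '0'])) = true then some "late"
     else (none : Option String))
    = (if (["2.5", "5", "10", "20", "30"] : List String).contains (String.ofList tw) = false then none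
       else pvRankLabel (PySem.List.index? (["2.5", "5", "10", "20", "30"] : List String) (String.ofList tw)) 1 1) := by
  by_cases e0 : tw = ['2', '.', '5']
  · subst e0; decide
  by_cases e1 : tw = ['5']
  · subst e1; decide
  by_cases e2 : tw = ['1', '0']
  · subst e2; decide
  by_cases e3 : tw = ['2', '0']
  · subst e3; decide
  by_cases e4 : tw = ['3', '0']
  · subst e4; decide
  have hc : (["2.5", "5", "10", "20", "30"] : List String).contains (String.ofList tw) = false := by
    simp only [List.contains_eq_mem, pv_ofList_eq_iff, decide_eq_false_iff_not, List.mem_cons, List.not_mem_nil, not_or]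
    simp_all [pv_ofList_eq_iff]
  simp [hc, e0, e1, e2, e3, e4, pv_ofList_eq_iff, pvRankLabel] <;> simp_all [pv_ofList_eq_iff]

theorem inner_Guegler_T7 (tw : List Char) :
    (if (tw == ['2', '.', '5'] || (tw == ['5'] || tw == ['1', '0'])) = true then some "early"
     else if (tw == ['2', '0']) = true then some "middle"
     else if (tw == ['3', '0']) = true then some "late"
     else (none : Option String))
    = (if (["2.5", "5", "10", "20", "30"] : List String).contains (String.ofList tw) = false then none
       else pvRankLabel (PySem.List.index? (["2.5", "5", "10", "20", "30"] : List String) (String.ofList tw)) 3 1) := by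
  by_cases e0 : tw = ['2', '.', '5']
  · subst e0; decide
  by_cases e1 : tw = ['5']
  · subst e1; decide
  by_cases e2 : tw = ['1', '0']
  · subst e2; decide
  by_cases e3 : tw = ['2', '0']
  · subst e3; decide
  by_cases e4 : tw = ['3', '0']
  · subst e4; decide
  have hc : (["2.5", "5", "10", "20", "30"] : List String).contains (String.ofList tw) = false := by
    simp only [List.contains_eq_mem, pv_ofList_eq_iff, decide_eq_false_iff_not, List.mem_cons, List.not_mem_nil, not_or]
    simp_all [pv_ofList_eq_iff]
  simp [hc, e0, e1, e2, e3, e4, pv_ofList_eq_iff, pvRankLabel] <;> simp_all [pv_ofList_eq_iff]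

theorem inner_Sprenger (tw : List Char) :
    (if (tw == ['0']) = true then some "early"
     else if (tw == ['3', '0']) = true then some "middle"
     else if (tw == ['6', '0']) = true then some "late"
     else (none : Option String))
    = (if (["0", "30", "60"] : List String).contains (String.ofList tw) = false then none
       else pvRankLabel (PySem.List.index? (["0", "30", "60"] : List String) (String.ofList tw)) 1 1) := by
  by_cases e0 : tw = ['0']
  · subst e0; decide
  by_cases e1 : tw = ['3', '0']
  · subst e1; decide
  by_cases e2 : tw = ['6', '0']
  · subst e2; decide
  have hc : (["0", "30", "60"] : List String).contains (String.ofList tw) = false := by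
    simp only [List.contains_eq_mem, pv_ofList_eq_iff, decide_eq_false_iff_not, List.mem_cons, List.not_mem_nil, not_or]
    simp_all [pv_ofList_eq_iff]
  simp [hc, e0, e1, e2, pv_ofList_eq_iff, pvRankLabel] <;> simp_all [pv_ofList_eq_iff]

-- ===== VERDICT (by name: the statement is the Claim_ definition above) =====
set_option maxHeartbeats 4000000 in
theorem classify_timepoint_spec : Claim_equal_classify_timepoint := by
  intro col filename _
  unfold Spec_classify_timepoint classify_timepoint classify_timepoint_alt
  have h0 := pv_startswith_token col ['0'] (by decide)
  have h2 := pv_startswith_token col ['2'] (by decide)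
  have h25 := pv_startswith_token col ['2', '.', '5'] (by decide)
  have h5 := pv_startswith_token col ['5'] (by decide)
  have h10 := pv_startswith_token col ['1', '0'] (by decide)
  have h15 := pv_startswith_token col ['1', '5'] (by decide)
  have h20 := pv_startswith_token col ['2', '0'] (by decide)
  have h25' := pv_startswith_token col ['2', '5'] (by decide)
  have h30 := pv_startswith_token col ['3', '0'] (by decide)
  have h60 := pv_startswith_token col ['6', '0'] (by decide)
  simp only [show ("0_" : String) = String.ofList (['0'] ++ ['_']) from rfl,
    show ("2_" : String) = String.ofList (['2'] ++ ['_']) from rfl,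
    show ("2.5_" : String) = String.ofList (['2', '.', '5'] ++ ['_']) from rfl,
    show ("5_" : String) = String.ofList (['5'] ++ ['_']) from rfl,
    show ("10_" : String) = String.ofList (['1', '0'] ++ ['_']) from rfl,
    show ("15_" : String) = String.ofList (['1', '5'] ++ ['_']) from rfl,
    show ("20_" : String) = String.ofList (['2', '0'] ++ ['_']) from rfl,
    show ("25_" : String) = String.ofList (['2', '5'] ++ ['_']) from rfl,
    show ("30_" : String) = String.ofList (['3', '0'] ++ ['_']) from rfl,
    show ("60_" : String) = String.ofList (['6', '0'] ++ ['_']) from rfl,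
    h0, h2, h25, h5, h10, h15, h20, h25', h30, h60, List.any_cons, List.any_nil]
  clear h0 h2 h25 h5 h10 h15 h20 h25' h30 h60
  set tw := col.toList.takeWhile (fun c => c ≠ '_') with htw
  clear htw
  cases hct : col.toList.contains '_' with
  | false => simp [hct, pvDatasets, pvScanDatasets]
  | true =>
    simp only [hct, Bool.and_true, Bool.or_false, Bool.true_eq_false, pvDatasets, pvScanDatasets]
    rcases Bool.eq_false_or_eq_true (PySem.Str.isIn "Lood" filename) with g1|g1 <;>
    rcases Bool.eq_false_or_eq_true (PySem.Str.isIn "Yang" filename) with g2|g2 <;>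
    rcases Bool.eq_false_or_eq_true (PySem.Str.isIn "Finstrlova" filename) with g3|g3 <;>
    rcases Bool.eq_false_or_eq_true (PySem.Str.isIn "Brandao" filename) with g4|g4 <;>
    rcases Bool.eq_false_or_eq_true (PySem.Str.isIn "Guegler_T4" filename) with g5|g5 <;>
    rcases Bool.eq_false_or_eq_true (PySem.Str.isIn "Guegler_T7" filename) with g6|g6 <;>
    rcases Bool.eq_false_or_eq_true (PySem.Str.isIn "Sprenger" filename) with g7|g7 <;>
    simp only [g1, g2, g3, g4, g5, g6, g7, Bool.false_eq_true, Bool.true_eq_false,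
      if_true, if_false, ite_true, ite_false, eq_self_iff_true] <;>
      first
        | rfl
        | exact inner_Lood tw
        | exact inner_Yang tw
        | exact inner_Finstrlova tw
        | exact inner_Brandao tw
        | exact inner_Guegler_T4 tw
        | exact inner_Guegler_T7 tw
        | exact inner_Sprenger tw
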